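-- pv_equiv track=rewrite | github.com/SashaPasha280kgtyaga/Task-3 | Task3Screenshot_9.py | get_digit_combinations
-- ===== SOURCE A (Python) =====
-- def get_digit_combinations(length, target_sum, prefix=''):
--     if length == 1:
--         if 0 <= target_sum <= 9:
--             return [prefix + str(target_sum)]
--         else:
--             return []
--
--     combinations = []
--     for digit in range(10):
--         new_prefix = prefix + str(digit)
--         new_target_sum = target_sum - digit
--         if 0 <= new_target_sum <= 9:
--             combinations += get_digit_combinations(length - 1, new_target_sum, new_prefix)
--
--     return combinations
-- ===== SOURCE B (Python) =====
-- def get_digit_combinations(length, target_sum, prefix=''):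
--     # Iterative breadth-first worklist instead of recursion.
--     work = [(target_sum, prefix)]
--     for _ in range(length - 1):
--         if not work:
--             break
--         next_work = []
--         for rem, pfx in work:
--             for d in range(10):
--                 r = rem - d
--                 if 0 <= r <= 9:
--                     next_work.append((r, pfx + str(d)))
--         work = next_work
--     return [pfx + str(rem) for rem, pfx in work if 0 <= rem <= 9]
-- ===== Notes on version B (the rewrite author's own statement) =====
-- stated objective: alternative
-- what changed: Replaced the recursive depth-first enumeration by an iterative breadth-first worklist: one list of (remaining-sum, prefix) pairs is expanded length-1 times over digits 0..9 and finally flushed through a filter, with no recursion at all.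
import Mathlib
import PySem

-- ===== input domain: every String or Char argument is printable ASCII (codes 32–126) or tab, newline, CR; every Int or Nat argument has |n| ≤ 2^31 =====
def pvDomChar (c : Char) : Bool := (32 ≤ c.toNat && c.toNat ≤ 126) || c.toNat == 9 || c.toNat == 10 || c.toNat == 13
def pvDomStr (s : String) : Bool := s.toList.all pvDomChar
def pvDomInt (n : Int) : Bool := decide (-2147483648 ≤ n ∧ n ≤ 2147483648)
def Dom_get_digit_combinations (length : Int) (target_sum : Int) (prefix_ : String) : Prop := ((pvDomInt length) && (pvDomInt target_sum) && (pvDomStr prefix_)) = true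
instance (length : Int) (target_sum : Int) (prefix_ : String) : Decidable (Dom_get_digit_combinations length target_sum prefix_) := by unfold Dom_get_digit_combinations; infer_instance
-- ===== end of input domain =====

-- B replaces A's depth-first recursion by an iterative breadth-first worklist (alternative decomposition, same cost).

-- ===== PORT A =====
-- Fuel = length.toNat only makes the recursion total; on every input admitted by
-- Pre_ the fuel never runs out on a path Python takes.
def goA : Nat → Int → Int → String → List String
  | 0, _, _, _ => []
  | f + 1, length, target_sum, prefix_ =>
    if length = 1 then
      if 0 ≤ target_sum ∧ target_sum ≤ 9 then [prefix_ ++ PySem.Int.toStr target_sum] else []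
    else
      (PySem.List.pyRange 0 10 1).foldl (fun combinations digit =>
        if 0 ≤ target_sum - digit ∧ target_sum - digit ≤ 9 then
          combinations ++ goA f (length - 1) (target_sum - digit) (prefix_ ++ PySem.Int.toStr digit)
        else combinations) []

def get_digit_combinations (length : Int) (target_sum : Int) (prefix_ : String) : List String :=
  goA length.toNat length target_sum prefix_

-- ===== PORT B =====
-- One expansion round of the worklist (the body of B's outer `for _ in range(length-1)` loop).
def roundB (work : List (Int × String)) : List (Int × String) :=
  work.foldl (fun next_work p =>
    (PySem.List.pyRange 0 10 1).foldl (fun nw d =>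
      if 0 ≤ p.1 - d ∧ p.1 - d ≤ 9 then nw ++ [(p.1 - d, p.2 ++ PySem.Int.toStr d)] else nw)
      next_work) []

-- B's `for _ in range(length-1)` with `if not work: break`, as a counted loop:
-- the counter is the number of remaining rounds, `work = []` exits early.
def loopB : Nat → List (Int × String) → List (Int × String)
  | 0, work => work
  | rounds + 1, work => if work = [] then work else loopB rounds (roundB work)

def get_digit_combinations_alt (length : Int) (target_sum : Int) (prefix_ : String) : List String :=
  let work := loopB (length - 1).toNat [(target_sum, prefix_)]
  work.foldl (fun out p =>
    if 0 ≤ p.1 ∧ p.1 ≤ 9 then out ++ [p.2 ++ PySem.Int.toStr p.1] else out) []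

-- ===== PRECONDITION & SPEC =====
-- Pre_ excludes exactly the inputs on which A raises RecursionError
-- (length ≤ 0 with 0 ≤ target_sum ≤ 18); everywhere else A returns normally.
def Pre_get_digit_combinations (length : Int) (target_sum : Int) (prefix_ : String) : Prop :=
  1 ≤ length ∨ target_sum < 0 ∨ 18 < target_sum
instance (length : Int) (target_sum : Int) (prefix_ : String) : Decidable (Pre_get_digit_combinations length target_sum prefix_) := by unfold Pre_get_digit_combinations; infer_instance

def pvWitness_get_digit_combinations : Int × Int × String := (3, 5, "x")

def Spec_get_digit_combinations (length : Int) (target_sum : Int) (prefix_ : String) (out : List String) : Prop := out = get_digit_combinations_alt length target_sum prefix_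
instance (length : Int) (target_sum : Int) (prefix_ : String) (out : List String) : Decidable (Spec_get_digit_combinations length target_sum prefix_ out) := by unfold Spec_get_digit_combinations; infer_instance

-- ===== CLAIM (what is proved, stated in full; the proofs are below) =====
def Claim_equal_get_digit_combinations : Prop := ∀ (length : Int) (target_sum : Int) (prefix_ : String), Dom_get_digit_combinations length target_sum prefix_ → Pre_get_digit_combinations length target_sum prefix_ → Spec_get_digit_combinations length target_sum prefix_ (get_digit_combinations length target_sum prefix_)


-- ===== LEMMAS AND PROOFS =====

-- One pair's expansions over digits 0..9, in filter/map form.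
def e1 (p : Int × String) : List (Int × String) :=
  ((PySem.List.pyRange 0 10 1).filter (fun d => decide (0 ≤ p.1 - d ∧ p.1 - d ≤ 9))).map
    (fun d => (p.1 - d, p.2 ++ PySem.Int.toStr d))

-- B's final flush: keep pairs with remaining sum in 0..9, emit prefix ++ str(rem).
def finB (work : List (Int × String)) : List String :=
  (work.filter (fun p => decide (0 ≤ p.1 ∧ p.1 ≤ 9))).map (fun p => p.2 ++ PySem.Int.toStr p.1)

lemma filter_map_eq_flatMap {α β : Type} (l : List α) (c : α → Prop) [DecidablePred c] (f : α → β) :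
    (l.filter (fun x => decide (c x))).map f = l.flatMap (fun x => if c x then [f x] else []) := by
  induction l with
  | nil => simp
  | cons x xs ih => by_cases h : c x <;> simp [h, ih]

lemma foldl_ite_append {α β : Type} (l : List α) (c : α → Prop) [DecidablePred c]
    (g : α → List β) (acc : List β) :
    l.foldl (fun a x => if c x then a ++ g x else a) acc
      = acc ++ l.flatMap (fun x => if c x then g x else []) := by
  induction l generalizing acc with
  | nil => simp
  | cons x xs ih => by_cases h : c x <;> simp [h, ih]

lemma foldl_append_flat {α β : Type} (l : List α) (g : α → List β) (acc : List β) :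
    l.foldl (fun a x => a ++ g x) acc = acc ++ l.flatMap g := by
  induction l generalizing acc with
  | nil => simp
  | cons x xs ih => simp [ih]

lemma roundB_eq (w : List (Int × String)) : roundB w = w.flatMap e1 := by
  unfold roundB
  have h : ∀ (nw : List (Int × String)) (p : Int × String),
      (PySem.List.pyRange 0 10 1).foldl (fun nw d =>
        if 0 ≤ p.1 - d ∧ p.1 - d ≤ 9 then nw ++ [(p.1 - d, p.2 ++ PySem.Int.toStr d)] else nw) nw
        = nw ++ e1 p := by
    intro nw p
    rw [PySem.List.foldl_append_ite]
    rfl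
  simp only [h]
  rw [foldl_append_flat]
  simp

lemma roundB_append (xs ys : List (Int × String)) :
    roundB (xs ++ ys) = roundB xs ++ roundB ys := by
  simp [roundB_eq]

lemma iter_roundB_nil (n : ℕ) : roundB^[n] [] = [] := by
  induction n with
  | zero => rfl
  | succ n ih => rw [Function.iterate_succ_apply, roundB_eq]; simpa using ih

lemma loopB_iterate (n : ℕ) (w : List (Int × String)) : loopB n w = roundB^[n] w := by
  induction n generalizing w with
  | zero => rfl
  | succ n ih =>
    rw [Function.iterate_succ_apply]
    by_cases h : w = []
    · subst h
      have : roundB ([] : List (Int × String)) = [] := rfl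
      rw [loopB, if_pos rfl, this, iter_roundB_nil]
    · rw [loopB, if_neg h, ih]

lemma iter_roundB_append (n : ℕ) (xs ys : List (Int × String)) :
    roundB^[n] (xs ++ ys) = roundB^[n] xs ++ roundB^[n] ys := by
  induction n generalizing xs ys with
  | zero => simp
  | succ n ih => rw [Function.iterate_succ_apply, roundB_append, ih,
      Function.iterate_succ_apply, Function.iterate_succ_apply]

lemma finB_append (xs ys : List (Int × String)) : finB (xs ++ ys) = finB xs ++ finB ys := by
  simp [finB]

lemma finB_iter_flatMap {α : Type} (n : ℕ) (l : List α) (g : α → List (Int × String)) :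
    finB (roundB^[n] (l.flatMap g)) = l.flatMap (fun x => finB (roundB^[n] (g x))) := by
  induction l with
  | nil => simp [iter_roundB_nil, finB]
  | cons x xs ih => simp [iter_roundB_append, finB_append, ih]

lemma main_lemma (n : ℕ) (ts : Int) (pfx : String) :
    goA (n + 1) ((n : Int) + 1) ts pfx = finB (roundB^[n] [(ts, pfx)]) := by
  induction n generalizing ts pfx with
  | zero =>
    by_cases h : 0 ≤ ts ∧ ts ≤ 9 <;> simp [goA, finB, h]
  | succ n ih =>
    have hne : ((n : Int) + 1 + 1) ≠ 1 := by omega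
    rw [show ((n : Int) + 1 + 1) = ((n + 1 : ℕ) : Int) + 1 by push_cast; ring] at *
    unfold goA
    rw [if_neg (by push_cast; omega : ¬ (((n + 1 : ℕ) : Int) + 1 = 1))]
    rw [foldl_ite_append]
    have harg : ∀ d : Int, ((n + 1 : ℕ) : Int) + 1 - 1 = ((n : Int) + 1) := by
      intro _; push_cast; ring
    have step : (fun d => if 0 ≤ ts - d ∧ ts - d ≤ 9 then
          goA (n + 1) (((n + 1 : ℕ) : Int) + 1 - 1) (ts - d) (pfx ++ PySem.Int.toStr d) else [])
        = (fun d => finB (roundB^[n] (if 0 ≤ ts - d ∧ ts - d ≤ 9 then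
            [(ts - d, pfx ++ PySem.Int.toStr d)] else []))) := by
      funext d
      by_cases h : 0 ≤ ts - d ∧ ts - d ≤ 9
      · rw [if_pos h, if_pos h, harg d, ih]
      · rw [if_neg h, if_neg h, iter_roundB_nil]; rfl
    rw [step]
    have hflat : (PySem.List.pyRange 0 10 1).flatMap
        (fun d => finB (roundB^[n] (if 0 ≤ ts - d ∧ ts - d ≤ 9 then
          [(ts - d, pfx ++ PySem.Int.toStr d)] else [])))
        = finB (roundB^[n] ((PySem.List.pyRange 0 10 1).flatMap
            (fun d => if 0 ≤ ts - d ∧ ts - d ≤ 9 then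
              [(ts - d, pfx ++ PySem.Int.toStr d)] else []))) :=
      (finB_iter_flatMap n _ _).symm
    rw [hflat]
    have he1 : (PySem.List.pyRange 0 10 1).flatMap
        (fun d => if 0 ≤ ts - d ∧ ts - d ≤ 9 then
          [(ts - d, pfx ++ PySem.Int.toStr d)] else []) = e1 (ts, pfx) := by
      rw [e1, filter_map_eq_flatMap]
    rw [he1]
    have : e1 (ts, pfx) = roundB [(ts, pfx)] := by simp [roundB_eq]
    rw [this, ← Function.iterate_succ_apply]
    simp

lemma alt_eq_finB (length target_sum : Int) (prefix_ : String) :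
    get_digit_combinations_alt length target_sum prefix_
      = finB (roundB^[(length - 1).toNat] [(target_sum, prefix_)]) := by
  unfold get_digit_combinations_alt
  rw [loopB_iterate]
  have h : ∀ w : List (Int × String), w.foldl (fun out p =>
      if 0 ≤ p.1 ∧ p.1 ≤ 9 then out ++ [p.2 ++ PySem.Int.toStr p.1] else out) [] = finB w := by
    intro w
    rw [PySem.List.foldl_append_ite]
    rfl
  rw [h]

-- ===== VERDICT (by name: the statement is the Claim_ definition above) =====
theorem get_digit_combinations_spec : Claim_equal_get_digit_combinations := by
  unfold Claim_equal_get_digit_combinations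
  intro length target_sum prefix_ _ hpre
  unfold Spec_get_digit_combinations get_digit_combinations
  rw [alt_eq_finB]
  rcases hpre with h1 | h2
  · -- length ≥ 1
    obtain ⟨n, hn⟩ : ∃ n : ℕ, length = (n : Int) + 1 :=
      ⟨(length - 1).toNat, by omega⟩
    subst hn
    have hto : ((n : Int) + 1).toNat = n + 1 := by omega
    have hto' : ((n : Int) + 1 - 1).toNat = n := by omega
    rw [hto, hto', main_lemma]
  · -- length ≤ 0 (else Pre_ forces it via ¬(first disjunct)), target_sum outside 0..18 ⊆ outside 0..9
    by_cases hl : 1 ≤ length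
    · obtain ⟨n, hn⟩ : ∃ n : ℕ, length = (n : Int) + 1 := ⟨(length - 1).toNat, by omega⟩
      subst hn
      have hto : ((n : Int) + 1).toNat = n + 1 := by omega
      have hto' : ((n : Int) + 1 - 1).toNat = n := by omega
      rw [hto, hto', main_lemma]
    · have h0 : length.toNat = 0 := by omega
      have h0' : (length - 1).toNat = 0 := by omega
      rw [h0, h0']
      have : ¬ (0 ≤ target_sum ∧ target_sum ≤ 9) := by omega
      simp [goA, finB, this]
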